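-- pv_equiv track=rewrite | github.com/Brian-Mascitello/UCB-Third-Party-Classes | Udacity-Intro-to-Algorithms/Lesson 2/Find Eulerian Tour.py | create_node_list
-- ===== SOURCE A (Python) =====
-- def create_node_list(graph):
--     """
--     Creates a list of all the unique nodes found inside graph.
--     :param graph:
--     :return:
--     """
--     node_list = list()
--     for item in graph:
--         for node in item:
--             if node not in node_list:
--                 node_list.append(node)
--     node_list.sort()
--     return node_list
-- ===== SOURCE B (Python) =====
-- def create_node_list(graph):
--     """
--     Creates a list of all the unique nodes found inside graph.
--     :param graph:
--     :return:
--     """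
--     all_nodes = [node for item in graph for node in item]
--     all_nodes.sort()
--     node_list = []
--     for node in all_nodes:
--         if not node_list or node_list[-1] != node:
--             node_list.append(node)
--     return node_list
-- ===== Notes on version B (the rewrite author's own statement) =====
-- stated objective: faster
-- what changed: Replaces the per-node membership test against the growing unique list (then sort) with flatten-all, sort once, and a single adjacent-duplicate scan over the sorted list; no set/dict and no membership test remains.
import Mathlib
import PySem

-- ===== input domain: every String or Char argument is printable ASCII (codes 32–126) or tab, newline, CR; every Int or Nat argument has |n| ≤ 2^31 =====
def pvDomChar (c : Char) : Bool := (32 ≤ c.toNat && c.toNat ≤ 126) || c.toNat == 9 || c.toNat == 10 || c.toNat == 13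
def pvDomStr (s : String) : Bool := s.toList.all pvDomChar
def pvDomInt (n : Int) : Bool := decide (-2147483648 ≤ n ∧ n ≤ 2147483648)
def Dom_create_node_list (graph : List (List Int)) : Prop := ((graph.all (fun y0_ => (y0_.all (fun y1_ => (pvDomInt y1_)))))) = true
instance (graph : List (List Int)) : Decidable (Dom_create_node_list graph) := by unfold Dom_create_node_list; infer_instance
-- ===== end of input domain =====

-- B replaces A's per-node membership scan over the growing unique list with
-- flatten-all, sort once, then one adjacent-duplicate scan (same return value).

-- ===== PORT A =====
def create_node_list (graph : List (List Int)) : List Int :=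
  let node_list := graph.foldl (fun nl item =>
    item.foldl (fun nl node => if node ∈ nl then nl else nl ++ [node]) nl) []
  PySem.List.sorted node_list (fun x => x) false

-- ===== PORT B =====
def create_node_list_alt (graph : List (List Int)) : List Int :=
  let all_nodes := graph.flatMap (fun item => item)
  let sorted_nodes := PySem.List.sorted all_nodes (fun x => x) false
  sorted_nodes.foldl
    (fun node_list node =>
      if node_list = [] ∨ node_list.getLast? ≠ some node then node_list ++ [node]
      else node_list) []

-- ===== PRECONDITION & SPEC =====
def Spec_create_node_list (graph : List (List Int)) (out : List Int) : Prop := out = create_node_list_alt graph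
instance (graph : List (List Int)) (out : List Int) : Decidable (Spec_create_node_list graph out) := by unfold Spec_create_node_list; infer_instance

-- ===== CLAIM (what is proved, stated in full; the proofs are below) =====
def Claim_equal_create_node_list : Prop := ∀ (graph : List (List Int)), Dom_create_node_list graph → Spec_create_node_list graph (create_node_list graph)

-- ===== LEMMAS AND PROOFS =====

-- A's inner loop: appending each unseen node keeps the accumulator duplicate-free
-- and its members are exactly the old members plus the item's nodes.
theorem pv_innerA (item : List Int) (acc : List Int) (h : acc.Nodup) :
    (item.foldl (fun nl node => if node ∈ nl then nl else nl ++ [node]) acc).Nodup ∧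
    ∀ x, x ∈ item.foldl (fun nl node => if node ∈ nl then nl else nl ++ [node]) acc ↔
      x ∈ acc ∨ x ∈ item := by
  induction item generalizing acc with
  | nil => simp [h]
  | cons a t ih =>
    simp only [List.foldl_cons]
    by_cases ha : a ∈ acc
    · simp only [if_pos ha]
      obtain ⟨h1, h2⟩ := ih acc h
      refine ⟨h1, fun x => ?_⟩
      rw [h2 x]
      constructor
      · rintro (hx | hx) <;> simp [hx]
      · rintro (hx | hx)
        · exact Or.inl hx
        · rcases List.mem_cons.mp hx with rfl | hx
          · exact Or.inl ha
          · exact Or.inr hx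
    · simp only [if_neg ha]
      have hnd : (acc ++ [a]).Nodup := by
        simp [List.nodup_append, h]
        intro a1 h1 he
        exact ha (he ▸ h1)
      obtain ⟨h1, h2⟩ := ih (acc ++ [a]) hnd
      refine ⟨h1, fun x => ?_⟩
      rw [h2 x]
      simp only [List.mem_append, List.mem_cons]
      tauto

-- A's outer loop: the accumulated unique list has exactly the flattened graph's members.
theorem pv_outerA (graph : List (List Int)) (acc : List Int) (h : acc.Nodup) :
    (graph.foldl (fun nl item =>
        item.foldl (fun nl node => if node ∈ nl then nl else nl ++ [node]) nl) acc).Nodup ∧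
    ∀ x, x ∈ graph.foldl (fun nl item =>
        item.foldl (fun nl node => if node ∈ nl then nl else nl ++ [node]) nl) acc ↔
      x ∈ acc ∨ x ∈ graph.flatMap (fun item => item) := by
  induction graph generalizing acc with
  | nil => simp [h]
  | cons it g ih =>
    simp only [List.foldl_cons]
    obtain ⟨h1, h2⟩ := pv_innerA it acc h
    obtain ⟨h3, h4⟩ := ih _ h1
    refine ⟨h3, fun x => ?_⟩
    rw [h4 x, h2 x]
    simp only [List.flatMap_cons, List.mem_append]
    tauto

-- In a strictly increasing list every member is ≤ the last element.
theorem pv_le_getLast {l : List Int} {a L : Int}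
    (hp : l.Pairwise (· < ·)) (ha : a ∈ l) (hL : l.getLast? = some L) : a ≤ L := by
  induction l with
  | nil => cases ha
  | cons x t ih =>
    cases t with
    | nil =>
      simp at hL ha
      omega
    | cons y t' =>
      rw [List.getLast?_cons_cons] at hL
      have hLt : L ∈ y :: t' := List.mem_of_mem_getLast? (by simp [hL])
      rcases List.mem_cons.mp ha with rfl | ha'
      · have := (List.pairwise_cons.mp hp).1 L hLt
        omega
      · exact ih (List.pairwise_cons.mp hp).2 ha' hL

-- B's scan: over a sorted (≤) list, with an accumulator that is strictly increasing
-- and entirely ≤ the upcoming elements, the result is strictly increasing and has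
-- exactly the members of accumulator and input.
theorem pv_scanB (s : List Int) (acc : List Int)
    (hs : s.Pairwise (· ≤ ·)) (hacc : acc.Pairwise (· < ·))
    (hle : ∀ a ∈ acc, ∀ b ∈ s, a ≤ b) :
    (s.foldl (fun nl node =>
        if nl = [] ∨ nl.getLast? ≠ some node then nl ++ [node] else nl) acc).Pairwise (· < ·) ∧
    ∀ x, x ∈ s.foldl (fun nl node =>
        if nl = [] ∨ nl.getLast? ≠ some node then nl ++ [node] else nl) acc ↔
      x ∈ acc ∨ x ∈ s := by
  induction s generalizing acc with
  | nil => simp [hacc]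
  | cons b t ih =>
    simp only [List.foldl_cons]
    have hst := List.pairwise_cons.mp hs
    by_cases hc : acc = [] ∨ acc.getLast? ≠ some b
    · simp only [if_pos hc]
      have haltb : ∀ a ∈ acc, a < b := by
        intro a ha
        have hab : a ≤ b := hle a ha b (List.mem_cons_self)
        rcases eq_or_lt_of_le hab with rfl | h
        · -- a = b ∈ acc; show contradiction with getLast? ≠ some b (acc nonempty here)
          exfalso
          have hne : acc ≠ [] := fun h0 => by simp [h0] at ha
          obtain ⟨L, hL⟩ : ∃ L, acc.getLast? = some L := by
            cases hLo : acc.getLast? with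
            | none => exact absurd (List.getLast?_eq_none_iff.mp hLo) hne
            | some L => exact ⟨L, rfl⟩
          have hLb : acc.getLast? ≠ some a := by
            rcases hc with h0 | h0
            · exact absurd h0 hne
            · exact h0
          have hLmem : L ∈ acc := List.mem_of_mem_getLast? (by simp [hL])
          have h1 : a ≤ L := pv_le_getLast hacc ha hL
          have h2 : L ≤ a := hle L hLmem a (List.mem_cons_self)
          have : L = a := le_antisymm h2 h1
          rw [hL, this] at hLb
          exact hLb rfl
        · exact h
      have hacc' : (acc ++ [b]).Pairwise (· < ·) := by
        rw [List.pairwise_append]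
        exact ⟨hacc, List.pairwise_singleton _ _, by simpa using haltb⟩
      have hle' : ∀ a ∈ acc ++ [b], ∀ c ∈ t, a ≤ c := by
        intro a ha c hc'
        rcases List.mem_append.mp ha with ha' | ha'
        · exact hle a ha' c (List.mem_cons_of_mem _ hc')
        · simp at ha'; subst ha'; exact hst.1 c hc'
      obtain ⟨h1, h2⟩ := ih (acc ++ [b]) hst.2 hacc' hle'
      refine ⟨h1, fun x => ?_⟩
      rw [h2 x]
      simp only [List.mem_append, List.mem_cons]
      tauto
    · simp only [if_neg hc]
      have hcl : acc.getLast? = some b := by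
        by_cases h0 : acc.getLast? = some b
        · exact h0
        · exact absurd (Or.inr h0) hc
      have hbmem : b ∈ acc := List.mem_of_mem_getLast? (by simp [hcl])
      have hle' : ∀ a ∈ acc, ∀ c ∈ t, a ≤ c := by
        intro a ha c hc'
        exact hle a ha c (List.mem_cons_of_mem _ hc')
      obtain ⟨h1, h2⟩ := ih acc hst.2 hacc hle'
      refine ⟨h1, fun x => ?_⟩
      rw [h2 x]
      simp only [List.mem_cons]
      constructor
      · rintro (hx | hx) <;> tauto
      · rintro (hx | rfl | hx) <;> [exact Or.inl hx; exact Or.inl hbmem; exact Or.inr hx]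

-- ===== VERDICT (by name: the statement is the Claim_ definition above) =====
theorem create_node_list_spec : Claim_equal_create_node_list := by
  intro graph _
  unfold Spec_create_node_list create_node_list create_node_list_alt
  simp only
  set flat := graph.flatMap (fun item => item) with hflat
  obtain ⟨hund, humem⟩ := pv_outerA graph [] List.nodup_nil
  have hs : (PySem.List.sorted flat (fun x => x) false).Pairwise (· ≤ ·) := by
    have := PySem.List.sorted_pairwise (xs := flat) (key := fun x => x)
    simpa using this
  obtain ⟨hrp, hrmem⟩ := pv_scanB (PySem.List.sorted flat (fun x => x) false) [] hs
    List.Pairwise.nil (by simp)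
  -- the two lists are permutations of each other (both duplicate-free, same members)
  have hperm : ((PySem.List.sorted flat (fun x => x) false).foldl
      (fun nl node => if nl = [] ∨ nl.getLast? ≠ some node then nl ++ [node] else nl)
      []).Perm (graph.foldl (fun nl item =>
        item.foldl (fun nl node => if node ∈ nl then nl else nl ++ [node]) nl) []) := by
    rw [List.perm_ext_iff_of_nodup (hrp.imp fun h => ne_of_lt h) hund]
    intro x
    rw [hrmem x, humem x, PySem.List.mem_sorted]
  exact PySem.List.sorted_eq_of_perm_of_pairwise_lt _ _ (fun x => x) hperm (by simpa using hrp)
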